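-- pv_equiv track=rewrite | github.com/robertaassis/Artificial-Intelligence | F6/algoritmo_genetico.py | converte_base
-- ===== SOURCE A (Python) =====
-- def converte_base(binario):
--     decimal, i = 0, 0
--     while(binario != 0):
--         dec = binario % 10
--         decimal = decimal + dec * pow(2, i)
--         binario = binario//10
--         i += 1
--     return decimal
-- ===== SOURCE B (Python) =====
-- def converte_base(binario):
--     decimal = 0
--     for d in str(binario):
--         decimal = decimal * 2 + int(d)
--     return decimal
-- ===== Notes on version B (the rewrite author's own statement) =====
-- stated objective: idiomatic
-- what changed: Replaces the right-to-left digit-peeling loop with explicit positional powers of two by a single Horner-style forward pass over str(binario), doubling a running accumulator; Pre_ excludes negative inputs, on which A's while loop never terminates.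
import Mathlib
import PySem

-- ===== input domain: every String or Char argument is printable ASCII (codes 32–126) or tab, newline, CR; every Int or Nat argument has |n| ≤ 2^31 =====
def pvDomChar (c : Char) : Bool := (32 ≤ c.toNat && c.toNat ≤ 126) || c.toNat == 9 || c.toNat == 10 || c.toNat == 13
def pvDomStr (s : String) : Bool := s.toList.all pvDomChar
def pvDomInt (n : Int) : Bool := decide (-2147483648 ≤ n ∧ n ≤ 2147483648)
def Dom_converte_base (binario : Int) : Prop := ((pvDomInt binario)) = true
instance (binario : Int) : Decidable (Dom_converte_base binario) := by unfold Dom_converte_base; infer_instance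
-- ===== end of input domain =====

-- B replaces A's right-to-left digit-peeling loop (explicit positional powers of two) by one Horner pass over str(binario) (idiomatic; equal for binario >= 0, A never returns on negatives).


-- ===== PORT A =====
-- A's while loop; Python's `while binario != 0` diverges for binario < 0 (binario//10 stays -1),
-- so the recursion guard is `0 < binario`, identical to `binario != 0` on every input Pre_ admits.
def convGoA (binario decimal : Int) (i : Nat) : Int :=
  if 0 < binario then
    convGoA (PySem.Int.floordiv binario 10) (decimal + PySem.Int.mod binario 10 * 2 ^ i) (i + 1)
  else decimal
termination_by binario.toNat
decreasing_by
  have h10 : PySem.Int.floordiv binario 10 = binario / 10 := Int.fdiv_eq_ediv_of_nonneg _ (by norm_num)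
  rw [h10]; omega

def converte_base (binario : Int) : Int := convGoA binario 0 0

-- ===== PORT B =====
-- Horner pass over str(binario); int(d) is ported as ord(d) - 48, exact on the digit
-- characters str(binario) produces for binario ≥ 0 (the whole of Pre_).
def converte_base_alt (binario : Int) : Int :=
  (PySem.Int.toStr binario).toList.foldl (fun decimal d => decimal * 2 + ((d.toNat : Int) - 48)) 0

-- ===== PRECONDITION & SPEC =====
-- Pre_ excludes negative inputs, on which A's while loop never terminates (binario//10 stays -1).
def Pre_converte_base (binario : Int) : Prop := 0 ≤ binario
instance (binario : Int) : Decidable (Pre_converte_base binario) := by unfold Pre_converte_base; infer_instance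
def pvWitness_converte_base : Int := (1011)

def Spec_converte_base (binario : Int) (out : Int) : Prop := out = converte_base_alt binario
instance (binario : Int) (out : Int) : Decidable (Spec_converte_base binario out) := by unfold Spec_converte_base; infer_instance

-- ===== CLAIM (what is proved, stated in full; the proofs are below) =====
def Claim_equal_converte_base : Prop := ∀ (binario : Int), Dom_converte_base binario → Pre_converte_base binario → Spec_converte_base binario (converte_base binario)

-- ===== LEMMAS AND PROOFS =====

-- the value both programs compute: decimal digits of n read as binary digits
def Hval (n : Nat) : Int :=
  if n = 0 then 0 else (n % 10 : Int) + 2 * Hval (n / 10)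
termination_by n
decreasing_by omega

-- number of decimal digits of n (with numD 0 = 1, matching str)
def numD (n : Nat) : Nat :=
  if n < 10 then 1 else numD (n / 10) + 1
termination_by n
decreasing_by omega

theorem Hval_zero : Hval 0 = 0 := by unfold Hval; simp

theorem Hval_small (n : Nat) (h : n < 10) : Hval n = (n : Int) := by
  unfold Hval
  rcases Nat.eq_zero_or_pos n with h0 | h0
  · simp [h0]
  · rw [if_neg (by omega), Nat.div_eq_of_lt h, Hval_zero]; omega

theorem Hval_step (n : Nat) (h : ¬ n = 0) : Hval n = (n % 10 : Int) + 2 * Hval (n / 10) := by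
  rw [Hval, if_neg h]

theorem numD_small (n : Nat) (h : n < 10) : numD n = 1 := by rw [numD, if_pos h]

theorem numD_step (n : Nat) (h : ¬ n < 10) : numD n = numD (n / 10) + 1 := by
  rw [numD, if_neg h]

theorem digitChar_val (d : Nat) (h : d < 10) :
    ((Nat.digitChar d).toNat : Int) - 48 = (d : Int) := by
  interval_cases d <;> decide

theorem convGoA_eq (n : Nat) : ∀ (dec : Int) (i : Nat),
    convGoA (n : Int) dec i = dec + 2 ^ i * Hval n := by
  induction n using Nat.strong_induction_on with
  | _ n ih =>
    intro dec i
    rcases Nat.eq_zero_or_pos n with h0 | h0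
    · subst h0; rw [convGoA]; simp [Hval_zero]
    · rw [convGoA, if_pos (by exact_mod_cast h0)]
      have hd : PySem.Int.floordiv (n : Int) 10 = ((n / 10 : Nat) : Int) := by
        unfold PySem.Int.floordiv
        rw [Int.fdiv_eq_ediv_of_nonneg _ (by norm_num)]
        omega
      have hm : PySem.Int.mod (n : Int) 10 = (n : Int) % 10 := by
        unfold PySem.Int.mod
        rw [Int.fmod_eq_emod]
        simp
      rw [hd, hm, ih (n / 10) (by omega), Hval_step n (by omega)]
      ring
theorem foldl_toDigitsCore (f : Nat) : ∀ (n : Nat) (s : Int) (acc : List Char), n < 10 ^ (f + 1) →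
    List.foldl (fun decimal d => decimal * 2 + ((d.toNat : Int) - 48)) s
        (Nat.toDigitsCore 10 (f + 1) n acc)
      = List.foldl (fun decimal d => decimal * 2 + ((d.toNat : Int) - 48))
          (s * 2 ^ numD n + Hval n) acc := by
  induction f with
  | zero =>
    intro n s acc hn
    have hn10 : n < 10 := by simpa using hn
    have hdiv : n / 10 = 0 := Nat.div_eq_of_lt hn10
    rw [Nat.toDigitsCore, if_pos hdiv]
    simp only [List.foldl_cons]
    rw [Nat.mod_eq_of_lt hn10, digitChar_val n hn10, numD_small n hn10, Hval_small n hn10]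
    ring_nf
  | succ f ih =>
    intro n s acc hn
    rw [Nat.toDigitsCore]
    by_cases hdiv : n / 10 = 0
    · have hn10 : n < 10 := by omega
      rw [if_pos hdiv]
      simp only [List.foldl_cons]
      rw [Nat.mod_eq_of_lt hn10, digitChar_val n hn10, numD_small n hn10, Hval_small n hn10]
      ring_nf
    · rw [if_neg hdiv]
      have hlt : n / 10 < 10 ^ (f + 1) := by
        have : 10 ^ (f + 1 + 1) = 10 ^ (f + 1) * 10 := by ring
        rw [this] at hn
        omega
      rw [ih (n / 10) s (Nat.digitChar (n % 10) :: acc) hlt]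
      simp only [List.foldl_cons]
      rw [digitChar_val (n % 10) (by omega), numD_step n (by omega),
        Hval_step n (by omega)]
      push_cast
      ring_nf

theorem lt_pow_succ (m : Nat) : m < 10 ^ (m + 1) := by
  calc m < 2 ^ m := Nat.lt_two_pow_self
    _ ≤ 10 ^ m := Nat.pow_le_pow_left (by norm_num) m
    _ ≤ 10 ^ (m + 1) := Nat.pow_le_pow_right (by norm_num) (by omega)

theorem alt_eq (n : Nat) : converte_base_alt (n : Int) = Hval n := by
  unfold converte_base_alt
  rw [PySem.Int.toList_toStr]
  unfold PySem.Int.toChars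
  rw [if_neg (by omega : ¬ (n : Int) < 0)]
  have htn : (n : Int).toNat = n := Int.toNat_natCast n
  rw [htn, Nat.toDigits]
  rw [foldl_toDigitsCore n n 0 [] (lt_pow_succ n)]
  simp only [List.foldl_nil]
  ring

-- ===== VERDICT (by name: the statement is the Claim_ definition above) =====
theorem converte_base_spec : Claim_equal_converte_base := by
  intro binario _ hpre
  unfold Spec_converte_base converte_base
  obtain ⟨n, rfl⟩ : ∃ n : Nat, binario = (n : Int) :=
    ⟨binario.toNat, (Int.toNat_of_nonneg hpre).symm⟩
  rw [convGoA_eq n 0 0, alt_eq n]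
  ring
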